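-- pv_equiv track=rewrite | github.com/zaijianyutian/socailnetwork | deep learning/Transformer_based/PrepareData.py | ids2tokens
-- ===== SOURCE A (Python) =====
-- def ids2tokens(ids, word2idx, idx2word):
--     '''
--     由id映射回word
--     '''
--     eos = word2idx['<eos>']
--     tokens = []
--     for i in ids:
--         if i == eos:
--             break
--         tokens.append(idx2word[i])
--     return tokens
-- ===== SOURCE B (Python) =====
-- def ids2tokens(ids, word2idx, idx2word):
--     eos = word2idx['<eos>']
--     cut = ids.index(eos) if eos in ids else len(ids)
--     return [idx2word[i] for i in ids[:cut]]
-- ===== Notes on version B (the rewrite author's own statement) =====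
-- stated objective: idiomatic
-- what changed: B locates the stop point first (ids.index(eos) or len(ids)) and then maps the prefix slice in a flat comprehension, instead of A's fused scan with break and append-in-loop.
import Mathlib
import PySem

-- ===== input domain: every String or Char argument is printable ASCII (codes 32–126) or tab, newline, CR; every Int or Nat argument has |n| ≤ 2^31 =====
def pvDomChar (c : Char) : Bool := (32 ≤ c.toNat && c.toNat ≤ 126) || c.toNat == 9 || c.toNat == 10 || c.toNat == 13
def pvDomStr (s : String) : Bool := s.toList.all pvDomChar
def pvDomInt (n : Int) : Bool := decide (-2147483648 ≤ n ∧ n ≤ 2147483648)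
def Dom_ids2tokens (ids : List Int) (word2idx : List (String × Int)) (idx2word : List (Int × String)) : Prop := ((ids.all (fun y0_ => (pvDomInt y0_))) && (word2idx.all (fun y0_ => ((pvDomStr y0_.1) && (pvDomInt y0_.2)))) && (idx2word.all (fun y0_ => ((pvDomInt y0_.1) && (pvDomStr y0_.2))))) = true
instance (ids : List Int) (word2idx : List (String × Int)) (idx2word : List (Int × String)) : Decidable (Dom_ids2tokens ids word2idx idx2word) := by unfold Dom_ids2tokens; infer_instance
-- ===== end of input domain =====

-- B locates the stop point first (index of eos, or the length) and maps the prefix slice,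
-- instead of A's fused scan-with-break and append-in-loop; same cost, plainer decomposition.

-- ===== PORT A =====
def pvLookS (d : List (String × Int)) (k : String) : Option Int :=
  (d.find? (fun p => p.1 == k)).map (·.2)

def pvLookI (d : List (Int × String)) (k : Int) : Option String :=
  (d.find? (fun p => p.1 == k)).map (·.2)

-- A's loop: append idx2word[i] to the accumulator, break at eos
def pvLoopA (eos : Int) (idx2word : List (Int × String)) : List Int → List String → List String
  | [], acc => acc
  | i :: rest, acc =>
    if i == eos then acc
    else pvLoopA eos idx2word rest (acc ++ [(pvLookI idx2word i).getD ""])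

def ids2tokens (ids : List Int) (word2idx : List (String × Int)) (idx2word : List (Int × String)) : List String :=
  match pvLookS word2idx "<eos>" with
  | none => []          -- KeyError in Python; excluded by Pre_
  | some eos => pvLoopA eos idx2word ids []

-- ===== PORT B =====
def ids2tokens_alt (ids : List Int) (word2idx : List (String × Int)) (idx2word : List (Int × String)) : List String :=
  match pvLookS word2idx "<eos>" with
  | none => []          -- KeyError in Python; excluded by Pre_
  | some eos =>
    let cut : Nat := (PySem.List.index? ids eos).getD ids.length
    (ids.take cut).map (fun i => (pvLookI idx2word i).getD "")

-- ===== PRECONDITION & SPEC =====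
-- Pre_ excludes exactly the inputs where the Python A raises KeyError: a missing
-- '<eos>' key in word2idx, or an id before the first eos that is absent from idx2word.
def Pre_ids2tokens (ids : List Int) (word2idx : List (String × Int)) (idx2word : List (Int × String)) : Prop :=
  (pvLookS word2idx "<eos>").isSome = true ∧
  ∀ i ∈ ids.takeWhile (fun i => !(some i == pvLookS word2idx "<eos>")), (pvLookI idx2word i).isSome = true
instance (ids : List Int) (word2idx : List (String × Int)) (idx2word : List (Int × String)) : Decidable (Pre_ids2tokens ids word2idx idx2word) := by unfold Pre_ids2tokens; infer_instance

def pvWitness_ids2tokens : List Int × (List (String × Int)) × (List (Int × String)) :=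
  ([1, 0, 2, 1], [("a", 1), ("<eos>", 2)], [(0, "b"), (1, "a")])

def Spec_ids2tokens (ids : List Int) (word2idx : List (String × Int)) (idx2word : List (Int × String)) (out : List String) : Prop := out = ids2tokens_alt ids word2idx idx2word
instance (ids : List Int) (word2idx : List (String × Int)) (idx2word : List (Int × String)) (out : List String) : Decidable (Spec_ids2tokens ids word2idx idx2word out) := by unfold Spec_ids2tokens; infer_instance

-- ===== CLAIM (what is proved, stated in full; the proofs are below) =====
def Claim_equal_ids2tokens : Prop := ∀ (ids : List Int) (word2idx : List (String × Int)) (idx2word : List (Int × String)), Dom_ids2tokens ids word2idx idx2word → Pre_ids2tokens ids word2idx idx2word → Spec_ids2tokens ids word2idx idx2word (ids2tokens ids word2idx idx2word)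

-- ===== LEMMAS AND PROOFS =====

-- A's accumulator loop produces the map of the strict prefix before the first eos
lemma pvLoopA_eq (eos : Int) (d : List (Int × String)) :
    ∀ (ids : List Int) (acc : List String),
      pvLoopA eos d ids acc
        = acc ++ (ids.takeWhile (fun i => !(i == eos))).map (fun i => (pvLookI d i).getD "") := by
  intro ids
  induction ids with
  | nil => intro acc; simp [pvLoopA]
  | cons i rest ih =>
    intro acc
    by_cases h : i == eos
    · simp [pvLoopA, h, List.takeWhile]
    · simp [pvLoopA, h, List.takeWhile, ih]

-- B's locate-then-slice produces the same strict prefix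
lemma take_cut_eq_takeWhile (eos : Int) :
    ∀ (ids : List Int),
      ids.take ((PySem.List.index? ids eos).getD ids.length)
        = ids.takeWhile (fun i => !(i == eos)) := by
  intro ids
  induction ids with
  | nil => simp
  | cons i rest ih =>
    by_cases h : i == eos
    · have : i = eos := by simpa using h
      subst this
      rw [PySem.List.index?_cons_self]
      simp [List.takeWhile]
    · have hne : i ≠ eos := by simpa using h
      rw [PySem.List.index?_cons_of_ne rest hne]
      rw [List.takeWhile_cons_of_pos (by simpa using hne), ← ih]
      cases PySem.List.index? rest eos with
      | none => simp
      | some k => simp [List.take_succ_cons]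

-- ===== VERDICT (by name: the statement is the Claim_ definition above) =====
theorem ids2tokens_spec : Claim_equal_ids2tokens := by
  intro ids word2idx idx2word _ _
  unfold Spec_ids2tokens ids2tokens ids2tokens_alt
  cases hlk : pvLookS word2idx "<eos>" with
  | none => rfl
  | some eos =>
    simp only [pvLoopA_eq, take_cut_eq_takeWhile, List.nil_append]
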